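-- pv_equiv track=rewrite | github.com/abbasmoosajee07/EverybodyCodes | 2024/10/2024Day10_P2.py | calc_rune_power
-- ===== SOURCE A (Python) =====
-- def calc_rune_power(rune_string):
--     base_power = {
--     'A': 1, 'B': 2, 'C': 3, 'D': 4, 'E': 5, 'F': 6, 'G': 7, 'H': 8,
--     'I': 9, 'J': 10, 'K': 11, 'L': 12, 'M': 13, 'N': 14, 'O': 15,
--     'P': 16, 'Q': 17, 'R': 18, 'S': 19, 'T': 20, 'U': 21, 'V': 22,
--     'W': 23, 'X': 24, 'Y': 25, 'Z': 26
--     }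
--     rune_power = 0
--     for pos, letter in enumerate(rune_string):
--         score = (pos + 1) * base_power.get(letter, 0)  # Handle cases where letter is not found
--         rune_power += score
--     return rune_power
-- ===== SOURCE B (Python) =====
-- def calc_rune_power(rune_string):
--     # Reverse pass with a running suffix-sum accumulator: a letter at 0-based
--     # position p stays in `running` for the last p+1 iterations, so summing
--     # `running` every step yields sum((p+1)*value) without enumerate or a dict.
--     running = 0
--     rune_power = 0
--     for letter in reversed(rune_string):
--         running += ord(letter) - 64 if 'A' <= letter <= 'Z' else 0
--         rune_power += running
--     return rune_power
-- ===== Notes on version B (the rewrite author's own statement) =====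
-- stated objective: alternative
-- what changed: Replaces the enumerate-and-multiply pass with a dict lookup by a reversed pass maintaining a running suffix-sum accumulator (position weight arises from repeated accumulation) and computes letter values arithmetically from ord.
import Mathlib
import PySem

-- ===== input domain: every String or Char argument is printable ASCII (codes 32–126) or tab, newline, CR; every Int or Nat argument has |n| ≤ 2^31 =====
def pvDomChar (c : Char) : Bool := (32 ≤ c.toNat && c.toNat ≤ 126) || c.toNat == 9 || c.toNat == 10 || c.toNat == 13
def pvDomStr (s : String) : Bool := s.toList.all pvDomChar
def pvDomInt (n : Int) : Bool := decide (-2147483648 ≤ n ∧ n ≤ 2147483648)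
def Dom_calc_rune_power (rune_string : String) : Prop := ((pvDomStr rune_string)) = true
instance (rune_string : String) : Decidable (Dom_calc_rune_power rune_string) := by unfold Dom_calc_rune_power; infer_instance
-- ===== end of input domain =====

-- B replaces A's enumerate + dict-lookup weighted sum by a reversed pass with a running
-- suffix-sum accumulator and arithmetic letter values (alternative decomposition, same cost).


-- ===== PORT A =====
def basePower : PySem.Dict Char Int := PySem.Dict.ofList
  [('A', 1), ('B', 2), ('C', 3), ('D', 4), ('E', 5), ('F', 6), ('G', 7), ('H', 8), ('I', 9), ('J', 10), ('K', 11), ('L', 12), ('M', 13), ('N', 14), ('O', 15), ('P', 16), ('Q', 17), ('R', 18), ('S', 19), ('T', 20), ('U', 21), ('V', 22), ('W', 23), ('X', 24), ('Y', 25), ('Z', 26)]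

def calc_rune_power (rune_string : String) : Int :=
  (PySem.List.enumerate rune_string.toList 0).foldl
    (fun rune_power p => rune_power + (p.1 + 1) * basePower.getD p.2 0) 0

-- ===== PORT B =====
def calc_rune_power_alt (rune_string : String) : Int :=
  (rune_string.toList.reverse.foldl
    (fun (st : Int × Int) letter =>
      let running := st.1 + (if 'A' ≤ letter ∧ letter ≤ 'Z' then (letter.toNat : Int) - 64 else 0)
      (running, st.2 + running)) (0, 0)).2

-- ===== PRECONDITION & SPEC =====
def Spec_calc_rune_power (rune_string : String) (out : Int) : Prop := out = calc_rune_power_alt rune_string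
instance (rune_string : String) (out : Int) : Decidable (Spec_calc_rune_power rune_string out) := by unfold Spec_calc_rune_power; infer_instance

-- ===== CLAIM (what is proved, stated in full; the proofs are below) =====
def Claim_equal_calc_rune_power : Prop := ∀ (rune_string : String), Dom_calc_rune_power rune_string → Spec_calc_rune_power rune_string (calc_rune_power rune_string)

-- ===== LEMMAS AND PROOFS =====

-- B's letter value function
def letterVal (c : Char) : Int :=
  if 'A' ≤ c ∧ c ≤ 'Z' then (c.toNat : Int) - 64 else 0

-- A's dict lookup equals B's arithmetic value, for every character.
theorem getD_basePower (c : Char) : basePower.getD c 0 = letterVal c := by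
  by_cases h : 'A' ≤ c ∧ c ≤ 'Z'
  · have h1 : 65 ≤ c.toNat := h.1
    have h2 : c.toNat ≤ 90 := h.2
    have hc : Char.ofNat c.toNat = c := Char.ofNat_toNat c
    interval_cases hn : c.toNat <;> (rw [← hc]; decide)
  · have hn : ¬ (65 ≤ c.toNat ∧ c.toNat ≤ 90) := fun hcon => h ⟨hcon.1, hcon.2⟩
    have hk : ∀ (k : Char), 65 ≤ k.toNat → k.toNat ≤ 90 → (k == c) = false := by
      intro k hk1 hk2
      apply beq_eq_false_iff_ne.mpr
      intro he; subst he; exact hn ⟨hk1, hk2⟩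
    have hA : ('A' == c) = false := hk 'A' (by decide) (by decide)
    have hB : ('B' == c) = false := hk 'B' (by decide) (by decide)
    have hC : ('C' == c) = false := hk 'C' (by decide) (by decide)
    have hD : ('D' == c) = false := hk 'D' (by decide) (by decide)
    have hE : ('E' == c) = false := hk 'E' (by decide) (by decide)
    have hF : ('F' == c) = false := hk 'F' (by decide) (by decide)
    have hG : ('G' == c) = false := hk 'G' (by decide) (by decide)
    have hH : ('H' == c) = false := hk 'H' (by decide) (by decide)
    have hI : ('I' == c) = false := hk 'I' (by decide) (by decide)
    have hJ : ('J' == c) = false := hk 'J' (by decide) (by decide)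
    have hK : ('K' == c) = false := hk 'K' (by decide) (by decide)
    have hL : ('L' == c) = false := hk 'L' (by decide) (by decide)
    have hM : ('M' == c) = false := hk 'M' (by decide) (by decide)
    have hN : ('N' == c) = false := hk 'N' (by decide) (by decide)
    have hO : ('O' == c) = false := hk 'O' (by decide) (by decide)
    have hP : ('P' == c) = false := hk 'P' (by decide) (by decide)
    have hQ : ('Q' == c) = false := hk 'Q' (by decide) (by decide)
    have hR : ('R' == c) = false := hk 'R' (by decide) (by decide)
    have hS : ('S' == c) = false := hk 'S' (by decide) (by decide)
    have hT : ('T' == c) = false := hk 'T' (by decide) (by decide)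
    have hU : ('U' == c) = false := hk 'U' (by decide) (by decide)
    have hV : ('V' == c) = false := hk 'V' (by decide) (by decide)
    have hW : ('W' == c) = false := hk 'W' (by decide) (by decide)
    have hX : ('X' == c) = false := hk 'X' (by decide) (by decide)
    have hY : ('Y' == c) = false := hk 'Y' (by decide) (by decide)
    have hZ : ('Z' == c) = false := hk 'Z' (by decide) (by decide)
    have hb : basePower = PySem.Dict.mk [('A', 1), ('B', 2), ('C', 3), ('D', 4), ('E', 5), ('F', 6), ('G', 7), ('H', 8), ('I', 9), ('J', 10), ('K', 11), ('L', 12), ('M', 13), ('N', 14), ('O', 15), ('P', 16), ('Q', 17), ('R', 18), ('S', 19), ('T', 20), ('U', 21), ('V', 22), ('W', 23), ('X', 24), ('Y', 25), ('Z', 26)] := by decide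
    rw [letterVal, if_neg h, hb, PySem.Dict.getD_eq_get?_getD]
    simp only [PySem.Dict.get?_mk_cons, hA, hB, hC, hD, hE, hF, hG, hH, hI, hJ, hK, hL, hM, hN, hO, hP, hQ, hR, hS, hT, hU, hV, hW, hX, hY, hZ]
    rfl

-- the position-weighted sum both programs compute
def wsum (l : List Char) : Int :=
  ((PySem.List.enumerate l 0).map (fun p => (p.1 + 1) * letterVal p.2)).sum

theorem A_eq_wsum (s : String) : calc_rune_power s = wsum s.toList := by
  unfold calc_rune_power wsum
  rw [PySem.List.foldl_add (g := fun p : Int × Char => (p.1 + 1) * basePower.getD p.2 0)]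
  simp [getD_basePower]

theorem wsum_append_singleton (xs : List Char) (c : Char) :
    wsum (xs ++ [c]) = wsum xs + ((xs.length : Int) + 1) * letterVal c := by
  unfold wsum
  rw [PySem.List.enumerate_append]
  simp [PySem.List.enumerate_cons]

theorem B_foldl_snd (l : List Char) (r t : Int) :
    (l.foldl (fun (st : Int × Int) letter =>
      let running := st.1 + (if 'A' ≤ letter ∧ letter ≤ 'Z' then (letter.toNat : Int) - 64 else 0)
      (running, st.2 + running)) (r, t)).2
    = t + wsum l.reverse + l.length * r := by
  induction l generalizing r t with
  | nil => simp [wsum, PySem.List.enumerate_nil]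
  | cons c l ih =>
    simp only [List.foldl_cons, List.reverse_cons, List.length_cons]
    rw [ih]
    rw [wsum_append_singleton]
    rw [show (if 'A' ≤ c ∧ c ≤ 'Z' then (c.toNat : Int) - 64 else 0) = letterVal c from rfl]
    simp only [List.length_reverse]
    push_cast
    ring

theorem B_eq_wsum (s : String) : calc_rune_power_alt s = wsum s.toList := by
  unfold calc_rune_power_alt
  rw [B_foldl_snd]
  simp

-- ===== VERDICT (by name: the statement is the Claim_ definition above) =====
theorem calc_rune_power_spec : Claim_equal_calc_rune_power := by
  intro s _
  unfold Spec_calc_rune_power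
  rw [A_eq_wsum, B_eq_wsum]
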